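-- pv_equiv track=rewrite | github.com/rochacbruno/dotfiles | dotfiles/config/kak/plugins/kakoune-multi-file/scripts/multi_file_from_grep.py | lines_by_path_from_grep_matches
-- ===== SOURCE A (Python) =====
-- from collections import defaultdict
--
-- def lines_by_path_from_grep_matches(grep_matches, before, after):
--     lines_by_path = defaultdict(set)
--
--     for file_path, base_line_number in grep_matches:
--         for line_number in range(
--             max(base_line_number - before, 1),
--             base_line_number + after + 1,
--         ):
--             lines_by_path[file_path].add(line_number)
--
--     return [
--         (file_path, sorted(lines))
--         for file_path, lines in sorted(lines_by_path.items())
--     ]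
-- ===== SOURCE B (Python) =====
-- def lines_by_path_from_grep_matches(grep_matches, before, after):
--     bases_by_path = {}
--     for file_path, base in grep_matches:
--         bases_by_path.setdefault(file_path, []).append(base)
--     result = []
--     for file_path in sorted(bases_by_path):
--         lines = []
--         cur = 1
--         for base in sorted(bases_by_path[file_path]):
--             hi = base + after
--             start = max(base - before, cur)
--             if start <= hi:
--                 lines.extend(range(start, hi + 1))
--                 cur = hi + 1
--         if lines:
--             result.append((file_path, lines))
--     return result
-- ===== Notes on version B (the rewrite author's own statement) =====
-- stated objective: faster
-- what changed: Instead of inserting every context line of every match into a per-path hash set and sorting the sets at the end, B groups the raw base line numbers by path, sorts each path's bases once, and emits the merged context intervals in a single left-to-right cursor sweep, producing each output line exactly once.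
import Mathlib
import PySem

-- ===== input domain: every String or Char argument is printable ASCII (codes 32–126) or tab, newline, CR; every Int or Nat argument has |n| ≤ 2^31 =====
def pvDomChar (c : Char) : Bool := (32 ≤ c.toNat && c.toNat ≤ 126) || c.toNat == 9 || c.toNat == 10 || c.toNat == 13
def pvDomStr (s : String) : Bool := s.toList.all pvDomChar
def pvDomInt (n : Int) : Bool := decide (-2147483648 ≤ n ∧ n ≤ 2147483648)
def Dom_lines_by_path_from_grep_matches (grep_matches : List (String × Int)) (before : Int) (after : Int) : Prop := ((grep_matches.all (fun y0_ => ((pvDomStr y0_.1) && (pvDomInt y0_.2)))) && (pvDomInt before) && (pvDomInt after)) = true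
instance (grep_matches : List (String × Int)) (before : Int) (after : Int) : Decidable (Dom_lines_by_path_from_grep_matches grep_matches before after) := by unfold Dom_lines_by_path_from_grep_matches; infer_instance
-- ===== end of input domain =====

-- B replaces A's per-path hash sets of individual context lines by one sorted cursor sweep
-- per path that emits the merged context intervals directly (objective: faster).

-- ===== PORT A =====
-- A: defaultdict(set); for each match add every line of its context window to the path's set;
-- finally sort the items (keys are distinct, so Python's pair sort = sort by the path key)
-- and sort each set.
def lines_by_path_from_grep_matches (grep_matches : List (String × Int)) (before : Int) (after : Int) : List (String × List Int) :=
  let d : PySem.Dict String (PySem.Set Int) :=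
    grep_matches.foldl (fun d m =>
      (PySem.List.pyRange (max (m.2 - before) 1) (m.2 + after + 1) 1).foldl
        (fun d ln => d.insert m.1 (PySem.Set.add (d.getD m.1 PySem.Set.empty) ln)) d)
      PySem.Dict.empty
  (PySem.List.sorted d.items (fun it => it.1) false).map
    (fun it => (it.1, PySem.List.sorted it.2 (fun x => x) false))

-- ===== PORT B =====
-- B: group base line numbers by path, then for each path (in sorted order) sweep its sorted
-- bases once with a cursor, emitting each context line exactly once; paths whose sweep emits
-- nothing are skipped ('if lines:').
def lines_by_path_from_grep_matches_alt (grep_matches : List (String × Int)) (before : Int) (after : Int) : List (String × List Int) :=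
  let d : PySem.Dict String (List Int) :=
    grep_matches.foldl (fun d m => d.modify m.1 [] (fun bs => bs ++ [m.2])) PySem.Dict.empty
  (PySem.List.sorted d.keys (fun p => p) false).foldl (fun acc p =>
    let st := (PySem.List.sorted (d.getD p []) (fun x => x) false).foldl
      (fun (st : List Int × Int) b =>
        if max (b - before) st.2 ≤ b + after then
          (st.1 ++ PySem.List.pyRange (max (b - before) st.2) (b + after + 1) 1, b + after + 1)
        else st)
      ([], 1)
    if st.1 ≠ [] then acc ++ [(p, st.1)] else acc) []

-- ===== PRECONDITION & SPEC =====
def Spec_lines_by_path_from_grep_matches (grep_matches : List (String × Int)) (before : Int) (after : Int) (out : List (String × List Int)) : Prop := out = lines_by_path_from_grep_matches_alt grep_matches before after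
instance (grep_matches : List (String × Int)) (before : Int) (after : Int) (out : List (String × List Int)) : Decidable (Spec_lines_by_path_from_grep_matches grep_matches before after out) := by unfold Spec_lines_by_path_from_grep_matches; infer_instance

-- ===== CLAIM (what is proved, stated in full; the proofs are below) =====
def Claim_equal_lines_by_path_from_grep_matches : Prop := ∀ (grep_matches : List (String × Int)) (before : Int) (after : Int), Dom_lines_by_path_from_grep_matches grep_matches before after → Spec_lines_by_path_from_grep_matches grep_matches before after (lines_by_path_from_grep_matches grep_matches before after)

-- ===== LEMMAS AND PROOFS =====

-- the context window of one match, as A enumerates it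
def pvWindow (before after b : Int) : List Int :=
  PySem.List.pyRange (max (b - before) 1) (b + after + 1) 1

-- recursive form of B's cursor sweep
def pvEmit (before after : Int) : List Int → Int → List Int
  | [], _ => []
  | b :: rest, cur =>
    if max (b - before) cur ≤ b + after then
      PySem.List.pyRange (max (b - before) cur) (b + after + 1) 1
        ++ pvEmit before after rest (b + after + 1)
    else pvEmit before after rest cur

-- A's final dict
def pvDictA (before after : Int) (gm : List (String × Int)) : PySem.Dict String (PySem.Set Int) :=
  gm.foldl (fun d m =>
    (PySem.List.pyRange (max (m.2 - before) 1) (m.2 + after + 1) 1).foldl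
      (fun d ln => d.insert m.1 (PySem.Set.add (d.getD m.1 PySem.Set.empty) ln)) d)
    PySem.Dict.empty

-- B's grouping dict
def pvDictB (gm : List (String × Int)) : PySem.Dict String (List Int) :=
  gm.foldl (fun d m => d.modify m.1 [] (fun bs => bs ++ [m.2])) PySem.Dict.empty

-- B's per-path sweep result
def pvWalkB (before after : Int) (gm : List (String × Int)) (p : String) : List Int :=
  pvEmit before after (PySem.List.sorted ((pvDictB gm).getD p []) (fun x => x) false) 1

-- B's fold-with-pair-state equals the recursive sweep
lemma pvFoldl_emit (before after : Int) (bs : List Int) (acc : List Int) (cur : Int) :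
    (bs.foldl
      (fun (st : List Int × Int) b =>
        if max (b - before) st.2 ≤ b + after then
          (st.1 ++ PySem.List.pyRange (max (b - before) st.2) (b + after + 1) 1, b + after + 1)
        else st)
      (acc, cur)).1 = acc ++ pvEmit before after bs cur := by
  induction bs generalizing acc cur with
  | nil => simp [pvEmit]
  | cons b rest ih =>
    simp only [List.foldl_cons, pvEmit]
    by_cases h : max (b - before) cur ≤ b + after
    · rw [if_pos h, if_pos h, ih, List.append_assoc]
    · rw [if_neg h, if_neg h, ih]

lemma pvEmit_mem (before after : Int) (bs : List Int) (cur x : Int)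
    (hcur : 1 ≤ cur) (hs : bs.Pairwise (· ≤ ·)) :
    x ∈ pvEmit before after bs cur ↔
      cur ≤ x ∧ ∃ b ∈ bs, max (b - before) 1 ≤ x ∧ x ≤ b + after := by
  induction bs generalizing cur with
  | nil => simp [pvEmit]
  | cons b rest ih =>
    obtain ⟨hb, hrest⟩ := List.pairwise_cons.mp hs
    simp only [pvEmit]
    by_cases h : max (b - before) cur ≤ b + after
    · rw [if_pos h]
      rw [List.mem_append, PySem.List.mem_pyRange_one, ih (b + after + 1) (by omega) hrest]
      constructor
      · rintro (⟨h2, h3⟩ | ⟨h2, b', hb', h3, h4⟩)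
        · exact ⟨by omega, b, List.mem_cons_self .., by omega, by omega⟩
        · exact ⟨by omega, b', List.mem_cons_of_mem _ hb', h3, h4⟩
      · rintro ⟨hcx, b', hb'', h3, h4⟩
        rcases List.mem_cons.mp hb'' with rfl | hb'
        · left; omega
        · by_cases hx : x ≤ b + after
          · have := hb b' hb'; left; omega
          · right; exact ⟨by omega, b', hb', h3, h4⟩
    · rw [if_neg h, ih cur hcur hrest]
      constructor
      · rintro ⟨h1, b', hb', h2, h3⟩
        exact ⟨h1, b', List.mem_cons_of_mem _ hb', h2, h3⟩
      · rintro ⟨h1, b', hb'', h2, h3⟩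
        rcases List.mem_cons.mp hb'' with rfl | hb'
        · exfalso; omega
        · exact ⟨h1, b', hb', h2, h3⟩

lemma pvEmit_pairwise (before after : Int) (bs : List Int) (cur : Int) :
    (pvEmit before after bs cur).Pairwise (· < ·) ∧
      ∀ x ∈ pvEmit before after bs cur, cur ≤ x := by
  induction bs generalizing cur with
  | nil => simp [pvEmit]
  | cons b rest ih =>
    simp only [pvEmit]
    by_cases h : max (b - before) cur ≤ b + after
    · rw [if_pos h]
      obtain ⟨ihp, ihge⟩ := ih (b + after + 1)
      refine ⟨List.pairwise_append.mpr ⟨PySem.List.pairwise_lt_pyRange_one _ _, ihp, ?_⟩, ?_⟩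
      · intro x hx y hy
        rw [PySem.List.mem_pyRange_one] at hx
        have := ihge y hy; omega
      · intro x hx
        rcases List.mem_append.mp hx with hx | hx
        · rw [PySem.List.mem_pyRange_one] at hx; omega
        · have := ihge x hx; omega
    · rw [if_neg h]; exact ih cur

-- strictly increasing sorted list of a Nodup list
lemma pvSortedStrict {α : Type} [LinearOrder α] (K : List α) (hK : K.Nodup) :
    (PySem.List.sorted K (fun x => x) false).Pairwise (· < ·) := by
  have h1 : (PySem.List.sorted K (fun x => x) false).Pairwise (· ≤ ·) :=
    PySem.List.sorted_pairwise K (fun x => x)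
  have h2 : (PySem.List.sorted K (fun x => x) false).Nodup :=
    ((PySem.List.sorted_perm K (fun x => x) false).nodup_iff).mpr hK
  exact (h1.and h2).imp (fun h => lt_of_le_of_ne h.1 h.2)

-- A's inner loop (one match): value and keys
lemma pvInnerA_getD (q : String) (rng : List Int) (d : PySem.Dict String (PySem.Set Int))
    (p : String) (x : Int) :
    x ∈ (rng.foldl (fun d ln => d.insert q (PySem.Set.add (d.getD q PySem.Set.empty) ln)) d).getD
        p PySem.Set.empty ↔
      x ∈ d.getD p PySem.Set.empty ∨ (p = q ∧ x ∈ rng) := by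
  induction rng generalizing d with
  | nil => simp
  | cons ln rest ih =>
    rw [List.foldl_cons, ih]
    by_cases hpq : p = q
    · subst hpq
      rw [PySem.Dict.getD_insert_self, PySem.Set.mem_add]
      simp only [List.mem_cons]
      tauto
    · rw [PySem.Dict.getD_insert_of_ne _ _ _ hpq]
      simp [hpq]

lemma pvInnerA_keys (q : String) (rng : List Int) (d : PySem.Dict String (PySem.Set Int))
    (p : String) :
    p ∈ (rng.foldl (fun d ln => d.insert q (PySem.Set.add (d.getD q PySem.Set.empty) ln)) d).keys ↔
      p ∈ d.keys ∨ (p = q ∧ rng ≠ []) := by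
  induction rng generalizing d with
  | nil => simp
  | cons ln rest ih =>
    rw [List.foldl_cons, ih, PySem.Dict.mem_keys_insert]
    simp only [ne_eq, List.cons_ne_nil, not_false_iff, and_true]
    tauto

lemma pvInnerA_nodupVals (q : String) (rng : List Int) (d : PySem.Dict String (PySem.Set Int))
    (h : ∀ p, (d.getD p PySem.Set.empty).Nodup) :
    ∀ p, ((rng.foldl (fun d ln => d.insert q (PySem.Set.add (d.getD q PySem.Set.empty) ln)) d).getD
        p PySem.Set.empty).Nodup := by
  induction rng generalizing d with
  | nil => exact h
  | cons ln rest ih =>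
    rw [List.foldl_cons]
    refine ih _ (fun p => ?_)
    by_cases hpq : p = q
    · subst hpq
      rw [PySem.Dict.getD_insert_self]
      exact PySem.Set.nodup_add _ _ (h p)
    · rw [PySem.Dict.getD_insert_of_ne _ _ _ hpq]
      exact h p

-- A's dict over the whole match list: value, keys, nodup
lemma pvFoldA_getD (before after : Int) (gm : List (String × Int))
    (d : PySem.Dict String (PySem.Set Int)) (p : String) (x : Int) :
    x ∈ (gm.foldl (fun d m =>
        (PySem.List.pyRange (max (m.2 - before) 1) (m.2 + after + 1) 1).foldl
          (fun d ln => d.insert m.1 (PySem.Set.add (d.getD m.1 PySem.Set.empty) ln)) d) d).getD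
        p PySem.Set.empty ↔
      x ∈ d.getD p PySem.Set.empty ∨ ∃ b, (p, b) ∈ gm ∧ x ∈ pvWindow before after b := by
  induction gm generalizing d with
  | nil => simp
  | cons m rest ih =>
    rw [List.foldl_cons, ih, pvInnerA_getD]
    constructor
    · rintro ((h | ⟨rfl, hx⟩) | ⟨b, hb, hx⟩)
      · exact Or.inl h
      · exact Or.inr ⟨m.2, List.mem_cons_self .., hx⟩
      · exact Or.inr ⟨b, List.mem_cons_of_mem _ hb, hx⟩
    · rintro (h | ⟨b, hb, hx⟩)
      · exact Or.inl (Or.inl h)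
      · rcases List.mem_cons.mp hb with heq | hb'
        · refine Or.inl (Or.inr ?_)
          have h1 : p = m.1 := by rw [← heq]
          have h2 : b = m.2 := by rw [← heq]
          subst h2; exact ⟨h1, hx⟩
        · exact Or.inr ⟨b, hb', hx⟩

lemma pvFoldA_keys (before after : Int) (gm : List (String × Int))
    (d : PySem.Dict String (PySem.Set Int)) (p : String) :
    p ∈ (gm.foldl (fun d m =>
        (PySem.List.pyRange (max (m.2 - before) 1) (m.2 + after + 1) 1).foldl
          (fun d ln => d.insert m.1 (PySem.Set.add (d.getD m.1 PySem.Set.empty) ln)) d) d).keys ↔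
      p ∈ d.keys ∨ ∃ b, (p, b) ∈ gm ∧ pvWindow before after b ≠ [] := by
  induction gm generalizing d with
  | nil => simp
  | cons m rest ih =>
    rw [List.foldl_cons, ih, pvInnerA_keys]
    constructor
    · rintro ((h | ⟨rfl, hne⟩) | ⟨b, hb, hx⟩)
      · exact Or.inl h
      · exact Or.inr ⟨m.2, List.mem_cons_self .., hne⟩
      · exact Or.inr ⟨b, List.mem_cons_of_mem _ hb, hx⟩
    · rintro (h | ⟨b, hb, hx⟩)
      · exact Or.inl (Or.inl h)
      · rcases List.mem_cons.mp hb with heq | hb'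
        · refine Or.inl (Or.inr ?_)
          have h1 : p = m.1 := by rw [← heq]
          have h2 : b = m.2 := by rw [← heq]
          subst h2; exact ⟨h1, hx⟩
        · exact Or.inr ⟨b, hb', hx⟩

lemma pvFoldA_nodupKeys (before after : Int) (gm : List (String × Int))
    (d : PySem.Dict String (PySem.Set Int)) (h : d.keys.Nodup) :
    (gm.foldl (fun d m =>
        (PySem.List.pyRange (max (m.2 - before) 1) (m.2 + after + 1) 1).foldl
          (fun d ln => d.insert m.1 (PySem.Set.add (d.getD m.1 PySem.Set.empty) ln)) d) d).keys.Nodup := by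
  induction gm generalizing d with
  | nil => exact h
  | cons m rest ih =>
    rw [List.foldl_cons]
    exact ih _ (PySem.Dict.nodup_keys_foldl_insert_key _ (fun _ => m.1)
      (fun d ln => PySem.Set.add (d.getD m.1 PySem.Set.empty) ln) d h)

lemma pvFoldA_nodupVals (before after : Int) (gm : List (String × Int))
    (d : PySem.Dict String (PySem.Set Int)) (h : ∀ p, (d.getD p PySem.Set.empty).Nodup) :
    ∀ p, ((gm.foldl (fun d m =>
        (PySem.List.pyRange (max (m.2 - before) 1) (m.2 + after + 1) 1).foldl
          (fun d ln => d.insert m.1 (PySem.Set.add (d.getD m.1 PySem.Set.empty) ln)) d) d).getD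
        p PySem.Set.empty).Nodup := by
  induction gm generalizing d with
  | nil => exact h
  | cons m rest ih =>
    rw [List.foldl_cons]
    exact ih _ (pvInnerA_nodupVals _ _ _ h)

-- B's dict: bases of a path, keys
lemma pvDictB_getD (gm : List (String × Int)) (p : String) (b : Int) :
    b ∈ (pvDictB gm).getD p [] ↔ (p, b) ∈ gm := by
  unfold pvDictB
  rw [PySem.Dict.getD_foldl_modify_append]
  simp only [PySem.Dict.getD_empty, List.nil_append, List.mem_map, List.mem_filter]
  constructor
  · rintro ⟨m, ⟨hm, hq⟩, rfl⟩
    have : m.1 = p := by simpa using hq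
    rw [← this]; exact hm
  · intro h
    exact ⟨(p, b), ⟨h, by simp⟩, rfl⟩

lemma pvDictB_keys (gm : List (String × Int)) (p : String) :
    p ∈ (pvDictB gm).keys ↔ ∃ b, (p, b) ∈ gm := by
  unfold pvDictB
  rw [PySem.Dict.keys_foldl_modify_key gm (fun m : String × Int => m.1) ([] : List Int)
    (fun _ m bs => bs ++ [m.2]) PySem.Dict.empty]
  rw [PySem.Dict.keys_empty]
  rw [show PySem.Set.update ([] : List String) (gm.map (fun m => m.1)) =
      PySem.Set.ofList (gm.map (fun m => m.1)) from rfl]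
  rw [PySem.Set.mem_ofList, List.mem_map]
  constructor
  · rintro ⟨m, hm, rfl⟩; exact ⟨m.2, hm⟩
  · rintro ⟨b, hb⟩; exact ⟨(p, b), hb, rfl⟩

lemma pvDictB_nodupKeys (gm : List (String × Int)) : (pvDictB gm).keys.Nodup := by
  unfold pvDictB
  exact PySem.Dict.nodup_keys_foldl_modify_key gm (fun m : String × Int => m.1) ([] : List Int)
    (fun _ m bs => bs ++ [m.2]) PySem.Dict.empty PySem.Dict.nodup_keys_empty

-- membership in B's sweep output for a path
lemma pvWalkB_mem (before after : Int) (gm : List (String × Int)) (p : String) (x : Int) :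
    x ∈ pvWalkB before after gm p ↔ ∃ b, (p, b) ∈ gm ∧ x ∈ pvWindow before after b := by
  unfold pvWalkB
  have hsp : (PySem.List.sorted ((pvDictB gm).getD p []) (fun x => x) false).Pairwise (· ≤ ·) :=
    PySem.List.sorted_pairwise ((pvDictB gm).getD p []) (fun x => x)
  rw [pvEmit_mem _ _ _ _ _ le_rfl hsp]
  simp only [PySem.List.mem_sorted, pvDictB_getD, pvWindow, PySem.List.mem_pyRange_one]
  constructor
  · rintro ⟨h1, b, hb, h2, h3⟩
    exact ⟨b, hb, h2, by omega⟩
  · rintro ⟨b, hb, h2, h3⟩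
    exact ⟨by omega, b, hb, h2, by omega⟩

-- per path, A's sorted set equals B's sweep
lemma pvPerPath (before after : Int) (gm : List (String × Int)) (p : String) :
    PySem.List.sorted ((pvDictA before after gm).getD p PySem.Set.empty) (fun x => x) false
      = pvWalkB before after gm p := by
  apply PySem.List.sorted_eq_of_perm_of_pairwise_lt
  · apply (List.perm_ext_iff_of_nodup ?_ ?_).mpr
    · intro x
      rw [pvWalkB_mem]
      unfold pvDictA
      rw [pvFoldA_getD]
      simp
    · have := pvEmit_pairwise before after
        (PySem.List.sorted ((pvDictB gm).getD p []) (fun x => x) false) 1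
      exact (this.1.imp (fun h => ne_of_lt h))
    · exact pvFoldA_nodupVals before after gm PySem.Dict.empty (by simp) p
  · exact (pvEmit_pairwise before after _ 1).1

-- sorting a keyed item list of a Nodup key list is mapping over the sorted keys
lemma pvSorted_map_fst {ν : Type} (K : List String) (hK : K.Nodup) (v : String → ν) :
    PySem.List.sorted (K.map (fun k => (k, v k))) (fun it => it.1) false
      = (PySem.List.sorted K (fun x => x) false).map (fun k => (k, v k)) := by
  apply PySem.List.sorted_eq_of_perm_of_pairwise_lt
  · exact (PySem.List.sorted_perm K (fun x => x) false).map _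
  · rw [List.pairwise_map]
    exact pvSortedStrict K hK

-- A's sorted key list is B's sorted key list filtered to paths whose sweep is nonempty
lemma pvKeysEq (before after : Int) (gm : List (String × Int)) :
    PySem.List.sorted (pvDictA before after gm).keys (fun x => x) false
      = (PySem.List.sorted (pvDictB gm).keys (fun x => x) false).filter
          (fun p => decide (pvWalkB before after gm p ≠ [])) := by
  apply PySem.List.sorted_eq_of_perm_of_pairwise_lt
  · apply (List.perm_ext_iff_of_nodup ?_ ?_).mpr
    · intro p
      rw [List.mem_filter, PySem.List.mem_sorted, pvDictB_keys]
      unfold pvDictA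
      rw [pvFoldA_keys]
      simp only [PySem.Dict.keys_empty, List.not_mem_nil, false_or, decide_eq_true_eq]
      constructor
      · rintro ⟨⟨b0, hb0⟩, hne⟩
        obtain ⟨x, hx⟩ := List.exists_mem_of_ne_nil _ hne
        obtain ⟨b, hb, hxw⟩ := (pvWalkB_mem before after gm p x).mp hx
        exact ⟨b, hb, fun hnil => by rw [hnil] at hxw; exact List.not_mem_nil hxw⟩
      · rintro ⟨b, hb, hne⟩
        obtain ⟨x, hx⟩ := List.exists_mem_of_ne_nil _ hne
        refine ⟨⟨b, hb⟩, fun hnil => ?_⟩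
        have : x ∈ pvWalkB before after gm p :=
          (pvWalkB_mem before after gm p x).mpr ⟨b, hb, hx⟩
        rw [hnil] at this; exact List.not_mem_nil this
    · exact List.Nodup.filter _
        (((PySem.List.sorted_perm (pvDictB gm).keys (fun x => x) false).nodup_iff).mpr
          (pvDictB_nodupKeys gm))
    · exact pvFoldA_nodupKeys before after gm PySem.Dict.empty PySem.Dict.nodup_keys_empty
  · exact (pvSortedStrict _ (pvDictB_nodupKeys gm)).sublist List.filter_sublist

-- ===== VERDICT (by name: the statement is the Claim_ definition above) =====
theorem lines_by_path_from_grep_matches_spec : Claim_equal_lines_by_path_from_grep_matches := by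
  intro gm before after _
  unfold Spec_lines_by_path_from_grep_matches
  have hA : lines_by_path_from_grep_matches gm before after
      = (PySem.List.sorted (pvDictA before after gm).items (fun it => it.1) false).map
          (fun it => (it.1, PySem.List.sorted it.2 (fun x => x) false)) := rfl
  have hBp : lines_by_path_from_grep_matches_alt gm before after
      = (PySem.List.sorted (pvDictB gm).keys (fun p => p) false).foldl (fun acc p =>
          let st := (PySem.List.sorted ((pvDictB gm).getD p []) (fun x => x) false).foldl
            (fun (st : List Int × Int) b =>
              if max (b - before) st.2 ≤ b + after then
                (st.1 ++ PySem.List.pyRange (max (b - before) st.2) (b + after + 1) 1, b + after + 1)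
              else st)
            ([], 1)
          if st.1 ≠ [] then acc ++ [(p, st.1)] else acc) [] := rfl
  have hpt : ∀ p, ((PySem.List.sorted ((pvDictB gm).getD p []) (fun x => x) false).foldl
      (fun (st : List Int × Int) b =>
        if max (b - before) st.2 ≤ b + after then
          (st.1 ++ PySem.List.pyRange (max (b - before) st.2) (b + after + 1) 1, b + after + 1)
        else st)
      ([], 1)).1 = pvWalkB before after gm p := by
    intro p
    rw [pvFoldl_emit]
    rfl
  have hB : lines_by_path_from_grep_matches_alt gm before after
      = ((PySem.List.sorted (pvDictB gm).keys (fun x => x) false).filter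
          (fun p => decide (pvWalkB before after gm p ≠ []))).map
            (fun p => (p, pvWalkB before after gm p)) := by
    rw [hBp]
    simp only [hpt]
    exact PySem.List.foldl_append_ite (fun p => pvWalkB before after gm p ≠ [])
      (fun p => (p, pvWalkB before after gm p)) _ _
  rw [hA, hB]
  have hnk : (pvDictA before after gm).keys.Nodup :=
    pvFoldA_nodupKeys before after gm PySem.Dict.empty PySem.Dict.nodup_keys_empty
  rw [PySem.Dict.items_eq_map_keys _ hnk PySem.Set.empty,
    pvSorted_map_fst _ hnk, List.map_map, pvKeysEq before after gm]
  apply List.map_congr_left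
  intro p _
  simp only [Function.comp]
  rw [pvPerPath]
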